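-- pv_equiv track=rewrite | github.com/MarceloRodrigues19/fatec_ipi_pbd_atividade_02 | atv02.py | friends_user
-- ===== SOURCE A (Python) =====
-- def friends_user (user):
--     m_friends = 0
--     f_friends = 0
--     for friend in user ["friends"]:
--         if friend["sexo"] == "M":
--             m_friends += 1
--         else:
--             f_friends += 1
--     return (m_friends, f_friends)
-- ===== SOURCE B (Python) =====
-- def friends_user(user):
--     def count(friends, i):
--         # recursion over the index, combining results back-to-front
--         if i == len(friends):
--             return (0, 0)
--         m, f = count(friends, i + 1)
--         if friends[i]["sexo"] == "M":
--             return (m + 1, f)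
--         return (m, f + 1)
--     return count(user["friends"], 0)
-- ===== Notes on version B (the rewrite author's own statement) =====
-- stated objective: alternative
-- what changed: B replaces A's iterative two-counter loop with a structural recursion on the friends list that combines the tallies back-to-front (right fold) instead of accumulating front-to-back.
import Mathlib
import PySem

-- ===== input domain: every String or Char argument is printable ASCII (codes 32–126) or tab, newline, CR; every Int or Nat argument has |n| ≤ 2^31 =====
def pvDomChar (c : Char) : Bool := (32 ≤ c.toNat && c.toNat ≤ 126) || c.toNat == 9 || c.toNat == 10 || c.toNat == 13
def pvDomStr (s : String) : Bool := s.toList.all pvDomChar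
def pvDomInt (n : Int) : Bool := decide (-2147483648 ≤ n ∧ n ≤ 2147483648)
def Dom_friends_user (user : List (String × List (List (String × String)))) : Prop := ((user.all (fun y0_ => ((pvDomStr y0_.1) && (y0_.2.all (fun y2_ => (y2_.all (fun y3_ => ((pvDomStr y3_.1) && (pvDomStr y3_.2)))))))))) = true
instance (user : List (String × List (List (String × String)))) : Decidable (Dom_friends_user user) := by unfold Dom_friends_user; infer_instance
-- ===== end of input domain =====

-- B replaces A's iterative two-counter loop with a structural recursion combining tallies back-to-front (objective: alternative).

-- ===== PORT A =====
-- A: two counters, one per branch of the sexo test, accumulated left-to-right over user["friends"].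
def friends_user (user : List (String × List (List (String × String)))) : Int × Int :=
  let friends := ((PySem.Dict.mk user).get? "friends").getD []   -- Pre_ guarantees the key exists
  friends.foldl
    (fun (acc : Int × Int) friend =>
      if ((PySem.Dict.mk friend).get? "sexo").getD "" = "M" then (acc.1 + 1, acc.2)
      else (acc.1, acc.2 + 1))
    (0, 0)

-- ===== PORT B =====
-- B: structural recursion on the list (Source B recurses on the index i, which walks the
-- same suffixes); results are combined after the recursive call, i.e. back-to-front.
def friendsCount : List (List (String × String)) → Int × Int
  | [] => (0, 0)
  | friend :: rest =>
    let (m, f) := friendsCount rest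
    if ((PySem.Dict.mk friend).get? "sexo").getD "" = "M" then (m + 1, f) else (m, f + 1)

def friends_user_alt (user : List (String × List (List (String × String)))) : Int × Int :=
  friendsCount (((PySem.Dict.mk user).get? "friends").getD [])   -- Pre_ guarantees the key exists

-- ===== PRECONDITION & SPEC =====
-- Pre_ excludes exactly the inputs where Python A raises KeyError: a missing "friends"
-- key, or a friend without a "sexo" key.
def Pre_friends_user (user : List (String × List (List (String × String)))) : Prop :=
  ∃ friends, (PySem.Dict.mk user).get? "friends" = some friends ∧
    ∀ friend ∈ friends, ((PySem.Dict.mk friend).get? "sexo").isSome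
instance (user : List (String × List (List (String × String)))) : Decidable (Pre_friends_user user) := by unfold Pre_friends_user; infer_instance

def pvWitness_friends_user : (List (String × List (List (String × String)))) :=
  [("friends", [[("nome", "Ana"), ("sexo", "F")], [("sexo", "M")]])]

def Spec_friends_user (user : List (String × List (List (String × String)))) (out : Int × Int) : Prop := out = friends_user_alt user
instance (user : List (String × List (List (String × String)))) (out : Int × Int) : Decidable (Spec_friends_user user out) := by unfold Spec_friends_user; infer_instance

-- ===== CLAIM (what is proved, stated in full; the proofs are below) =====
def Claim_equal_friends_user : Prop := ∀ (user : List (String × List (List (String × String)))), Dom_friends_user user → Pre_friends_user user → Spec_friends_user user (friends_user user)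

-- ===== LEMMAS AND PROOFS =====

-- Loop invariant: A's left fold from (a, b) equals (a, b) plus B's right-to-left tally.
theorem fold_eq_count (l : List (List (String × String))) :
    ∀ a b : Int,
      l.foldl (fun (acc : Int × Int) friend =>
          if ((PySem.Dict.mk friend).get? "sexo").getD "" = "M" then (acc.1 + 1, acc.2)
          else (acc.1, acc.2 + 1)) (a, b)
      = (a + (friendsCount l).1, b + (friendsCount l).2) := by
  induction l with
  | nil => intro a b; simp [friendsCount]
  | cons x xs ih =>
    intro a b
    by_cases h : ((PySem.Dict.mk x).get? "sexo").getD "" = "M" <;>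
      simp [List.foldl_cons, friendsCount, h, ih, Prod.ext_iff] <;> ring

-- ===== VERDICT (by name: the statement is the Claim_ definition above) =====
theorem friends_user_spec : Claim_equal_friends_user := by
  intro user _ _
  unfold Spec_friends_user friends_user friends_user_alt
  simp [fold_eq_count]
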